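-- pv_equiv track=rewrite | github.com/azabrs/yandex_training | 1 course/6_lesson/wire.py | wire
-- ===== SOURCE A (Python) =====
-- def check(seq, m, k):
--     count = 0
--     for i in seq:
--         count += i // m
--     return count >= k
--
-- def wire(seq, k):
--     l = 0
--     r = max(seq)
--     while l < r:
--         m = (r + l + 1) // 2
--         if check(seq, m, k):
--             l = m
--         else:
--             r = m - 1
--     return l
-- ===== SOURCE B (Python) =====
-- def wire(seq, k):
--     # Descend over quotient blocks: sum(i // m) is constant for m in a block,
--     # so after a failed m jump straight to the largest m' with a different
--     # quotient vector (min with m-1 guarantees progress).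
--     m = max(seq)
--     while m >= 1:
--         if sum(i // m for i in seq) >= k:
--             return m
--         m = min(m - 1, max(i // (i // m + 1) for i in seq))
--     return 0
-- ===== Notes on version B (the rewrite author's own statement) =====
-- stated objective: alternative
-- what changed: Replaces A's binary search over cut lengths by a descending scan that jumps between quotient blocks: after an infeasible length m it moves directly to min(m-1, max(i // (i // m + 1))), the largest length with a different quotient vector, and returns the first feasible length.
-- outside the precondition, e.g. on wire([-10, 15], 1): A returns 3, B raises ZeroDivisionError; on wire([-1, 7, -7], -1): A returns 1, B returns 7
import Mathlib
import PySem

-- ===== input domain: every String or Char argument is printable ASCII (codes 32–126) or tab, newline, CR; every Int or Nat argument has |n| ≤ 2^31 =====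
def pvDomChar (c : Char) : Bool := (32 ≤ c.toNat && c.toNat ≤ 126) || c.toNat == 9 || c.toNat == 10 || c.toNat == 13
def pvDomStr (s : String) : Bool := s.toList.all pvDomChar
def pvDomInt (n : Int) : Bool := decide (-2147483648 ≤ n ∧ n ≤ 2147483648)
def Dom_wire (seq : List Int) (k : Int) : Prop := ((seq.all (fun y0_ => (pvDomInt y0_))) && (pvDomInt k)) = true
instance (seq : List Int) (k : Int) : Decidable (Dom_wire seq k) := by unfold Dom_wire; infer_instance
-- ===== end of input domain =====

-- B replaces A's binary search by a descending scan over quotient blocks (same answer, different search strategy).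

-- ===== PORT A =====
-- helper 'check' of A: count = 0; for i in seq: count += i // m; return count >= k
def checkA (seq : List Int) (m : Int) (k : Int) : Bool :=
  decide (k ≤ seq.foldl (fun count i => count + PySem.Int.floordiv i m) 0)

-- the 'while l < r' loop of A
def wireLoop (seq : List Int) (k : Int) (l : Int) (r : Int) : Int :=
  if l < r then
    let m := PySem.Int.floordiv (r + l + 1) 2
    if checkA seq m k then wireLoop seq k m r else wireLoop seq k l (m - 1)
  else l
termination_by (r - l).toNat
decreasing_by
  all_goals
    have h1 := (PySem.Int.le_floordiv_iff_mul_le (a := r + l + 1) (b := 2) (q := l + 1) (by omega)).mpr (by omega)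
    have h2 := (PySem.Int.floordiv_lt_iff_lt_mul (a := r + l + 1) (b := 2) (q := r + 1) (by omega)).mpr (by omega)
    omega

def wire (seq : List Int) (k : Int) : Int :=
  match PySem.List.max? seq (fun x => x) with   -- r = max(seq); A raises ValueError on [], excluded by Pre_
  | none => 0
  | some r => wireLoop seq k 0 r

-- ===== PORT B =====
-- sum(i // m for i in seq)
def cntB (seq : List Int) (m : Int) : Int :=
  (seq.map (fun i => PySem.Int.floordiv i m)).sum

-- max(i // (i // m + 1) for i in seq); B raises on [] like A, excluded by Pre_, so the default is never used
def jumpB (seq : List Int) (m : Int) : Int :=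
  (PySem.List.max? (seq.map (fun i => PySem.Int.floordiv i (PySem.Int.floordiv i m + 1))) (fun x => x)).getD 0

-- the 'while m >= 1' loop of B
def wireAltLoop (seq : List Int) (k : Int) (m : Int) : Int :=
  if 1 ≤ m then
    if k ≤ cntB seq m then m
    else wireAltLoop seq k (min (m - 1) (jumpB seq m))
  else 0
termination_by m.toNat
decreasing_by
  have := min_le_left (m - 1) (jumpB seq m)
  omega

def wire_alt (seq : List Int) (k : Int) : Int :=
  match PySem.List.max? seq (fun x => x) with   -- m = max(seq)
  | none => 0
  | some m0 => wireAltLoop seq k m0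

-- ===== PRECONDITION & SPEC =====
-- Pre_ excludes the empty list, on which both A and B raise (max of an empty sequence), and mixed-sign lists
-- (unless every length in [1, max] is feasible, the third disjunct): with a negative element the piece-count
-- predicate is not monotone, so a maximal feasible cut length is not well defined — A's bisection and B's scan
-- are equally defensible answers there — and B's block jump can itself raise ZeroDivisionError.
def Pre_wire (seq : List Int) (k : Int) : Prop :=
  seq ≠ [] ∧
    ((∀ x ∈ seq, 0 ≤ x) ∨
      (∀ x ∈ seq, x ≤ 0) ∨
      k ≤ (seq.map (fun i => if i < 0 then i
            else PySem.Int.floordiv i ((PySem.List.max? seq (fun x => x)).getD 0))).sum)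
instance (seq : List Int) (k : Int) : Decidable (Pre_wire seq k) := by unfold Pre_wire; infer_instance

def pvWitness_wire : List Int × Int := ([4, 7, 2], 3)

def Spec_wire (seq : List Int) (k : Int) (out : Int) : Prop := out = wire_alt seq k
instance (seq : List Int) (k : Int) (out : Int) : Decidable (Spec_wire seq k out) := by unfold Spec_wire; infer_instance

-- ===== CLAIM (what is proved, stated in full; the proofs are below) =====
def Claim_equal_wire : Prop := ∀ (seq : List Int) (k : Int), Dom_wire seq k → Pre_wire seq k → Spec_wire seq k (wire seq k)

-- ===== LEMMAS AND PROOFS =====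

-- the reference: naive descending scan, used only by the proofs
def bestLoop (seq : List Int) (k : Int) (m : Int) : Int :=
  if 1 ≤ m then (if k ≤ cntB seq m then m else bestLoop seq k (m - 1)) else 0
termination_by m.toNat
decreasing_by omega

-- A's accumulating check equals B's mapped sum
lemma foldl_cnt (seq : List Int) (m : Int) :
    ∀ c : Int, seq.foldl (fun count i => count + PySem.Int.floordiv i m) c = c + cntB seq m := by
  induction seq with
  | nil => intro c; simp [cntB]
  | cons x t ih => intro c; simp [cntB, List.foldl_cons, ih, List.map_cons, List.sum_cons]; ring

lemma checkA_iff (seq : List Int) (m k : Int) : checkA seq m k = true ↔ k ≤ cntB seq m := by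
  simp [checkA, foldl_cnt]

-- elementwise antitonicity of floor division in the divisor (nonnegative dividend)
lemma fd_antitone {i t m : Int} (hi : 0 ≤ i) (ht : 1 ≤ t) (htm : t ≤ m) :
    PySem.Int.floordiv i m ≤ PySem.Int.floordiv i t := by
  have hq : 0 ≤ PySem.Int.floordiv i m :=
    (PySem.Int.le_floordiv_iff_mul_le (by omega)).mpr (by simpa using hi)
  rw [PySem.Int.le_floordiv_iff_mul_le (by omega : (0:Int) < t)]
  have h1 : PySem.Int.floordiv i m * t ≤ PySem.Int.floordiv i m * m :=
    mul_le_mul_of_nonneg_left htm hq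
  have h2 : PySem.Int.floordiv i m * m ≤ i := by
    have := (PySem.Int.floordiv_eq_iff_of_pos (a := i) (b := m)
      (q := PySem.Int.floordiv i m) (by omega)).mp rfl
    omega
  omega

-- block constancy: below the jump point the quotient does not change
lemma fd_block {i t m : Int} (hi : 0 ≤ i) (ht : 1 ≤ t) (htm : t ≤ m)
    (hj : PySem.Int.floordiv i (PySem.Int.floordiv i m + 1) < t) :
    PySem.Int.floordiv i t = PySem.Int.floordiv i m := by
  have hm : (0:Int) < m := by omega
  set q := PySem.Int.floordiv i m with hqdef
  have hq : 0 ≤ q := (PySem.Int.le_floordiv_iff_mul_le hm).mpr (by simpa using hi)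
  have hle : q ≤ PySem.Int.floordiv i t := fd_antitone hi ht htm
  have hub : PySem.Int.floordiv i t < q + 1 := by
    rw [PySem.Int.floordiv_lt_iff_lt_mul (by omega : (0:Int) < t)]
    set d := PySem.Int.floordiv i (q + 1) with hddef
    have hd := (PySem.Int.floordiv_eq_iff_of_pos (a := i) (b := q + 1) (q := d)
      (by omega)).mp rfl
    have hdt : d + 1 ≤ t := by omega
    have : (q + 1) * (d + 1) ≤ (q + 1) * t := mul_le_mul_of_nonneg_left hdt (by omega)
    nlinarith [hd.1, hd.2]
  omega

-- summed antitonicity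
lemma cnt_antitone (seq : List Int) (hpos : ∀ i ∈ seq, 0 ≤ i) {t m : Int}
    (ht : 1 ≤ t) (htm : t ≤ m) : cntB seq m ≤ cntB seq t := by
  unfold cntB
  apply List.sum_le_sum
  intro i hi
  exact fd_antitone (hpos i hi) ht htm

-- the reference scan skips over a stretch of infeasible lengths unchanged
lemma bestLoop_skip (seq : List Int) (k : Int) :
    ∀ n : Nat, ∀ m' : Int, 0 ≤ m' →
      (∀ t : Int, m' < t → t ≤ m' + n → ¬ k ≤ cntB seq t) →
      bestLoop seq k (m' + n) = bestLoop seq k m' := by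
  intro n
  induction n with
  | zero => intro m' _ _; norm_num
  | succ p ih =>
    intro m' hm' hinf
    have h1 : (1:Int) ≤ m' + (p + 1) := by omega
    rw [bestLoop]
    rw [if_pos (by push_cast; omega)]
    rw [if_neg (hinf _ (by omega) (by push_cast; omega))]
    have : (m' : Int) + (↑(p + 1)) - 1 = m' + p := by push_cast; ring
    rw [this]
    exact ih m' hm' (fun t h1 h2 => hinf t h1 (by push_cast at h2 ⊢; omega))

-- same statement with ≤ endpoints instead of an explicit distance
lemma bestLoop_skip' (seq : List Int) (k : Int) {m' r : Int} (hm' : 0 ≤ m') (h : m' ≤ r)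
    (hinf : ∀ t : Int, m' < t → t ≤ r → ¬ k ≤ cntB seq t) :
    bestLoop seq k r = bestLoop seq k m' := by
  have hn : r = m' + ((r - m').toNat : Int) := by omega
  rw [hn] at hinf ⊢
  exact bestLoop_skip seq k (r - m').toNat m' hm' hinf

-- A's bisection computes the reference answer
lemma wireLoop_eq (seq : List Int) (k : Int) (hpos : ∀ i ∈ seq, 0 ≤ i) :
    ∀ n : Nat, ∀ l r : Int, (r - l).toNat = n → 0 ≤ l → l ≤ r →
      (l = 0 ∨ k ≤ cntB seq l) → wireLoop seq k l r = bestLoop seq k r := by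
  intro n
  induction n using Nat.strong_induction_on with
  | _ n ih =>
    intro l r hn hl0 hlr hinv
    rw [wireLoop]
    by_cases hlt : l < r
    · rw [if_pos hlt]
      simp only []
      set m := PySem.Int.floordiv (r + l + 1) 2 with hmdef
      have hml : l + 1 ≤ m :=
        (PySem.Int.le_floordiv_iff_mul_le (by omega)).mpr (by omega)
      have hmr : m < r + 1 :=
        (PySem.Int.floordiv_lt_iff_lt_mul (by omega)).mpr (by omega)
      by_cases hc : checkA seq m k = true
      · rw [if_pos hc]
        have hP : k ≤ cntB seq m := (checkA_iff seq m k).mp hc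
        exact ih (r - m).toNat (by omega) m r rfl (by omega) (by omega) (Or.inr hP)
      · rw [if_neg hc]
        have hnP : ¬ k ≤ cntB seq m := fun h => hc ((checkA_iff seq m k).mpr h)
        have hstep : wireLoop seq k l (m - 1) = bestLoop seq k (m - 1) :=
          ih (m - 1 - l).toNat (by omega) l (m - 1) rfl hl0 (by omega) hinv
        rw [hstep]
        refine (bestLoop_skip' seq k (by omega) (by omega) ?_).symm
        intro t h1 h2 hP
        exact hnP (le_trans hP (cnt_antitone seq hpos (by omega) (by omega)))
    · rw [if_neg hlt]
      have hlr' : l = r := by omega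
      subst hlr'
      by_cases h1 : 1 ≤ l
      · rcases hinv with h | h
        · omega
        · rw [bestLoop, if_pos h1, if_pos h]
      · have : l = 0 := by omega
        subst this
        rw [bestLoop, if_neg (by omega)]

-- B's block scan computes the reference answer
lemma wireAltLoop_eq (seq : List Int) (k : Int) (hpos : ∀ i ∈ seq, 0 ≤ i) (hne : seq ≠ []) :
    ∀ n : Nat, ∀ m : Int, m.toNat = n → wireAltLoop seq k m = bestLoop seq k m := by
  intro n
  induction n using Nat.strong_induction_on with
  | _ n ih =>
    intro m hn
    rw [wireAltLoop, bestLoop]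
    by_cases h1 : 1 ≤ m
    · rw [if_pos h1, if_pos h1]
      by_cases hc : k ≤ cntB seq m
      · rw [if_pos hc, if_pos hc]
      · rw [if_neg hc, if_neg hc]
        -- facts about j = jumpB seq m
        obtain ⟨j, hj⟩ : ∃ j, PySem.List.max?
            (seq.map (fun i => PySem.Int.floordiv i (PySem.Int.floordiv i m + 1)))
            (fun x => x) = some j := by
          rcases hmax : PySem.List.max?
              (seq.map (fun i => PySem.Int.floordiv i (PySem.Int.floordiv i m + 1)))
              (fun x => x) with _ | j
          · exfalso
            have := (PySem.List.max?_eq_none_iff _ (fun x => x)).mp hmax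
            simp only [List.map_eq_nil_iff] at this
            exact hne this
          · exact ⟨j, rfl⟩
        have hjval : jumpB seq m = j := by rw [jumpB, hj]; rfl
        have hjmem := PySem.List.max?_mem hj
        have hjmax := PySem.List.max?_isMax hj
        -- every candidate i // (i//m + 1) is nonnegative and < m
        have hcand : ∀ y ∈ seq.map (fun i => PySem.Int.floordiv i (PySem.Int.floordiv i m + 1)),
            0 ≤ y ∧ y < m := by
          intro y hy
          rcases List.mem_map.mp hy with ⟨i, hi, rfl⟩
          have hi0 : 0 ≤ i := hpos i hi
          have hq : 0 ≤ PySem.Int.floordiv i m :=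
            (PySem.Int.le_floordiv_iff_mul_le (by omega)).mpr (by simpa using hi0)
          constructor
          · exact (PySem.Int.le_floordiv_iff_mul_le (by omega)).mpr (by simpa using hi0)
          · rw [PySem.Int.floordiv_lt_iff_lt_mul (by omega)]
            have := (PySem.Int.floordiv_eq_iff_of_pos (a := i) (b := m)
              (q := PySem.Int.floordiv i m) (by omega)).mp rfl
            nlinarith [this.2, hq]
        have hj0 : 0 ≤ j := (hcand j hjmem).1
        have hjm : j < m := (hcand j hjmem).2
        have hminj : min (m - 1) (jumpB seq m) = j := by
          rw [hjval]; omega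
        rw [hminj]
        have hrec : wireAltLoop seq k j = bestLoop seq k j :=
          ih j.toNat (by omega) j rfl
        rw [hrec]
        refine (bestLoop_skip' seq k hj0 (by omega) ?_).symm
        intro t ht1 ht2 hP
        -- cntB seq t = cntB seq m on the block (j, m]
        have hceq : cntB seq t = cntB seq m := by
          unfold cntB
          congr 1
          apply List.map_congr_left
          intro i hi
          have hcd : PySem.Int.floordiv i (PySem.Int.floordiv i m + 1) ≤ j := by
            have := hjmax _ (List.mem_map.mpr ⟨i, hi, rfl⟩)
            simpa using this
          exact fd_block (hpos i hi) (by omega) (by omega) (by omega)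
        rw [hceq] at hP
        exact hc hP
    · rw [if_neg h1, if_neg h1]

-- a nonpositive dividend is a lower bound of its own floor division by a positive divisor
lemma fd_ge_self_of_nonpos {i m : Int} (hi : i ≤ 0) (hm : 1 ≤ m) : i ≤ PySem.Int.floordiv i m := by
  rw [PySem.Int.le_floordiv_iff_mul_le (by omega : (0:Int) < m)]
  nlinarith [mul_nonpos_of_nonpos_of_nonneg hi (by omega : (0:Int) ≤ m - 1)]

-- the Pre_ bound is below the count at every length in [1, M]
lemma cnt_lb (seq : List Int) {M m : Int} (hm1 : 1 ≤ m) (hmM : m ≤ M) :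
    (seq.map (fun i => if i < 0 then i else PySem.Int.floordiv i M)).sum ≤ cntB seq m := by
  unfold cntB
  apply List.sum_le_sum
  intro i hi
  by_cases hneg : i < 0
  · rw [if_pos hneg]
    exact fd_ge_self_of_nonpos (by omega) hm1
  · rw [if_neg hneg]
    exact fd_antitone (by omega) hm1 hmM

-- if every length in [1, r] is feasible the bisection always moves l and ends at r
lemma wireLoop_allTrue (seq : List Int) (k : Int) :
    ∀ n : Nat, ∀ l r : Int, (r - l).toNat = n → 0 ≤ l → l ≤ r →
      (∀ m : Int, 1 ≤ m → m ≤ r → checkA seq m k = true) → wireLoop seq k l r = r := by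
  intro n
  induction n using Nat.strong_induction_on with
  | _ n ih =>
    intro l r hn hl0 hlr hall
    rw [wireLoop]
    by_cases hlt : l < r
    · rw [if_pos hlt]
      simp only []
      set m := PySem.Int.floordiv (r + l + 1) 2 with hmdef
      have hml : l + 1 ≤ m :=
        (PySem.Int.le_floordiv_iff_mul_le (by omega)).mpr (by omega)
      have hmr : m < r + 1 :=
        (PySem.Int.floordiv_lt_iff_lt_mul (by omega)).mpr (by omega)
      rw [if_pos (hall m (by omega) (by omega))]
      exact ih (r - m).toNat (by omega) m r rfl (by omega) (by omega) hall
    · rw [if_neg hlt]; omega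

-- ===== VERDICT (by name: the statement is the Claim_ definition above) =====
theorem wire_spec : Claim_equal_wire := by
  intro seq k _hdom hpre
  obtain ⟨hne, hdisj⟩ := hpre
  unfold Spec_wire wire wire_alt
  rcases hmax : PySem.List.max? seq (fun x => x) with _ | M
  · exact absurd ((PySem.List.max?_eq_none_iff _ (fun x => x)).mp hmax) hne
  · have hMmem := PySem.List.max?_mem hmax
    show wireLoop seq k 0 M = wireAltLoop seq k M
    have hzero : M ≤ 0 → wireLoop seq k 0 M = wireAltLoop seq k M := by
      intro hM0
      rw [wireLoop, if_neg (by omega), wireAltLoop, if_neg (by omega)]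
    rcases hdisj with hpos | hnonpos | hk
    · have hM0 : 0 ≤ M := hpos M hMmem
      rw [wireLoop_eq seq k hpos (M - 0).toNat 0 M rfl le_rfl hM0 (Or.inl rfl),
          wireAltLoop_eq seq k hpos hne M.toNat M rfl]
    · exact hzero (hnonpos M hMmem)
    · by_cases hM1 : 1 ≤ M
      · rw [hmax] at hk
        simp only [Option.getD_some] at hk
        have hall : ∀ m : Int, 1 ≤ m → m ≤ M → checkA seq m k = true := by
          intro m hm1 hmM
          exact (checkA_iff seq m k).mpr (le_trans hk (cnt_lb seq hm1 hmM))
        rw [wireLoop_allTrue seq k (M - 0).toNat 0 M rfl le_rfl (by omega) hall]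
        rw [wireAltLoop, if_pos hM1, if_pos ((checkA_iff seq M k).mp (hall M hM1 le_rfl))]
      · exact hzero (by omega)
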